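-- pv_equiv track=rewrite | github.com/adnanhaider/TVShowsPythonScraper | moveFolders.py | CheckExactMatch
-- ===== SOURCE A (Python) =====
-- def CheckExactMatch(torrent, name_parts):
--     torrent_words = GetTorrentParts(torrent)
--     parts_matched = []
--     for part in name_parts:
--         for word in torrent_words:
--             if word == part.lower():
--                 parts_matched.append(1)
--                 break
--     if len(parts_matched) == len(name_parts):
--         return True
--     return False
--
-- def GetTorrentParts(torrent_name):
--     torrent_parts = []
--     word_in_torrent = ''
--     # is_last_word = False
--     tor_length = len(torrent_name)-1
--     for i, char in enumerate(torrent_name):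
--         if ord(char) >= ord('a') and ord(char) <= ord('z') or ord(char) >= ord('A') and ord(char) <= ord('Z'):
--             word_in_torrent += char
--             if i==tor_length:
--                 torrent_parts.append(word_in_torrent)
--         elif ord(char) >= ord('0') and ord(char) <= ord('9'):
--             word_in_torrent += char
--             if i==tor_length:
--                 torrent_parts.append(word_in_torrent)
--         else:
--             torrent_parts.append(word_in_torrent)
--             word_in_torrent = ''
--     return torrent_parts
-- ===== SOURCE B (Python) =====
-- def CheckExactMatch(torrent, name_parts):
--     needed = {p.lower() for p in name_parts}
--     for w in _Segments(torrent):
--         if not needed: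
--             return True
--         needed.discard(w)
--     return not needed
--
-- def _Segments(t):
--     segs = ['']
--     for c in t:
--         if c.isalnum():
--             segs[-1] += c
--         else:
--             segs.append('')
--     if not t or not t[-1].isalnum():
--         segs.pop()
--     return segs
-- ===== Notes on version B (the rewrite author's own statement) =====
-- stated objective: alternative
-- what changed: Instead of A's counting pass (for each name part scan the torrent words and append a 1, then compare counts) B builds one set of still-needed lowered parts and shrinks it in a single pass over the torrent words with an early exit, using a word splitter that keeps an eager segment list and pops the trailing segment instead of A's buffer with a last-index test.
import Mathlib
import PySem

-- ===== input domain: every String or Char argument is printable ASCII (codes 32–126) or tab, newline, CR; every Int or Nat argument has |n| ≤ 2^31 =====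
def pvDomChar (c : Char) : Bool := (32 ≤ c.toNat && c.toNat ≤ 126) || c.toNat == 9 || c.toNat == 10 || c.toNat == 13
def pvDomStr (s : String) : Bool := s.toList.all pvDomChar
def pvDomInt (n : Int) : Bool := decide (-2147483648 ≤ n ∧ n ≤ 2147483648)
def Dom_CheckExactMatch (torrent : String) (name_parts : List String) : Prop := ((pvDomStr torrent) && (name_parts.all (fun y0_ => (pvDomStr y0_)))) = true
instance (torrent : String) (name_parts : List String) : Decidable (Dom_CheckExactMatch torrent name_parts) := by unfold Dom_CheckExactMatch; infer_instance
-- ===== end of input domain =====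

-- B replaces A's per-part counting scan (build parts_matched, compare lengths) by a single pass over the
-- torrent words that shrinks a set of still-needed lowered parts, with a differently organised word splitter
-- (eager segment list + final pop instead of A's buffer with a last-index test); objective: alternative.

-- ===== PORT A =====
-- words are represented as List Char (String equality = equality of the char lists)
def pvGtpStep (torLen : Int) (st : List (List Char) × List Char) (ic : Int × Char) : List (List Char) × List Char :=
  if ('a' ≤ ic.2 && ic.2 ≤ 'z') || ('A' ≤ ic.2 && ic.2 ≤ 'Z') then
    let w := st.2 ++ [ic.2]
    (if ic.1 == torLen then st.1 ++ [w] else st.1, w)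
  else if ('0' ≤ ic.2 && ic.2 ≤ '9') then
    let w := st.2 ++ [ic.2]
    (if ic.1 == torLen then st.1 ++ [w] else st.1, w)
  else (st.1 ++ [st.2], [])

def GetTorrentParts (torrent_name : String) : List (List Char) :=
  ((PySem.List.enumerate torrent_name.toList).foldl
      (pvGtpStep ((torrent_name.toList.length : Int) - 1)) ([], [])).1

-- inner 'for word in torrent_words: if word == part.lower(): parts_matched.append(1); break'
def pvMatchLoop (pl : List Char) (acc : List Int) : List (List Char) → List Int
  | [] => acc
  | w :: ws => if w == pl then acc ++ [(1 : Int)] else pvMatchLoop pl acc ws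

def CheckExactMatch (torrent : String) (name_parts : List String) : Bool :=
  let torrent_words := GetTorrentParts torrent
  let parts_matched := name_parts.foldl
    (fun acc part => pvMatchLoop (PySem.Chars.lower part.toList) acc torrent_words) []
  if parts_matched.length = name_parts.length then true else false

-- ===== PORT B =====
-- segs[-1] += c  ↦  dropLast ++ [last ++ [c]];  segs.append('') ↦ ++ [[]];  segs.pop() ↦ dropLast
def pvSegStep (segs : List (List Char)) (c : Char) : List (List Char) :=
  if PySem.Chars.isalnum c then segs.dropLast ++ [(segs.getLast?.getD []) ++ [c]]
  else segs ++ [[]]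

def pvSegments (t : String) : List (List Char) :=
  let segs := t.toList.foldl pvSegStep [[]]
  match t.toList.getLast? with
  | none => segs.dropLast
  | some c => if PySem.Chars.isalnum c then segs else segs.dropLast

-- 'for w in segments: if not needed: return True; needed.discard(w)' then 'return not needed'
def pvNeedLoop : List (List Char) → PySem.Set (List Char) → Bool
  | [], needed => needed.isEmpty
  | w :: ws, needed => if needed.isEmpty then true else pvNeedLoop ws (PySem.Set.discard needed w)

def CheckExactMatch_alt (torrent : String) (name_parts : List String) : Bool :=
  let needed : PySem.Set (List Char) :=
    PySem.Set.ofList (name_parts.map (fun p => (PySem.Str.lower p).toList))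
  pvNeedLoop (pvSegments torrent) needed

-- ===== PRECONDITION & SPEC =====
def Spec_CheckExactMatch (torrent : String) (name_parts : List String) (out : Bool) : Prop := out = CheckExactMatch_alt torrent name_parts
instance (torrent : String) (name_parts : List String) (out : Bool) : Decidable (Spec_CheckExactMatch torrent name_parts out) := by unfold Spec_CheckExactMatch; infer_instance

-- ===== CLAIM (what is proved, stated in full; the proofs are below) =====
def Claim_equal_CheckExactMatch : Prop := ∀ (torrent : String) (name_parts : List String), Dom_CheckExactMatch torrent name_parts → Spec_CheckExactMatch torrent name_parts (CheckExactMatch torrent name_parts)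

-- ===== LEMMAS AND PROOFS =====

-- the common index-free splitting step both extractors implement
def pvAl (c : Char) : Bool :=
  (('a' ≤ c && c ≤ 'z') || ('A' ≤ c && c ≤ 'Z')) || ('0' ≤ c && c ≤ '9')

def pvPlainStep (st : List (List Char) × List Char) (c : Char) : List (List Char) × List Char :=
  if pvAl c then (st.1, st.2 ++ [c]) else (st.1 ++ [st.2], [])

theorem pvAl_eq_isalnum (c : Char) : pvAl c = PySem.Chars.isalnum c := by
  simp only [pvAl, PySem.Chars.isalnum, PySem.Chars.isalpha, PySem.Chars.isdigit,
    PySem.Chars.isupper, PySem.Chars.islower]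
  rw [Bool.or_comm (decide ('A' ≤ c) && decide (c ≤ 'Z'))]

-- A's indexed fold never hits the last-index branch strictly before the end
theorem pvGtp_fold_eq_plain (ys : List Char) :
    ∀ (s L : Int) (st : List (List Char) × List Char), s + ys.length ≤ L →
    (PySem.List.enumerate ys s).foldl (pvGtpStep L) st = ys.foldl pvPlainStep st := by
  induction ys with
  | nil => intro s L st _; simp [PySem.List.enumerate]
  | cons c ys ih =>
    intro s L st h
    rw [PySem.List.enumerate_cons, List.foldl_cons, List.foldl_cons]
    have hs : s ≠ L := by
      intro hEq; subst hEq
      simp only [List.length_cons] at h; omega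
    have hstep : pvGtpStep L st (s, c) = pvPlainStep st c := by
      simp only [pvGtpStep, pvPlainStep, pvAl, beq_iff_eq]
      by_cases h1 : (('a' ≤ c && c ≤ 'z') || ('A' ≤ c && c ≤ 'Z')) = true
      · simp [h1, hs]
      · by_cases h2 : (('0' ≤ c && c ≤ '9')) = true
        · simp [h1, h2, hs]
        · simp [h1, h2]
    rw [hstep]
    apply ih; simp only [List.length_cons] at h; omega

-- B's fold state is A's plain fold state flattened as done ++ [current]
theorem pvSeg_fold_rep (cs : List Char) :
    ∀ (d : List (List Char)) (w : List Char),
    cs.foldl pvSegStep (d ++ [w]) =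
      (cs.foldl pvPlainStep (d, w)).1 ++ [(cs.foldl pvPlainStep (d, w)).2] := by
  induction cs with
  | nil => intro d w; simp
  | cons c cs ih =>
    intro d w
    rw [List.foldl_cons, List.foldl_cons]
    by_cases h : pvAl c = true
    · have hstep : pvSegStep (d ++ [w]) c = d ++ [w ++ [c]] := by
        simp [pvSegStep, ← pvAl_eq_isalnum, h]
      rw [hstep, ih]
      simp [pvPlainStep, h]
    · have hstep : pvSegStep (d ++ [w]) c = (d ++ [w]) ++ [[]] := by
        simp [pvSegStep, ← pvAl_eq_isalnum, h]
      rw [hstep, ih (d ++ [w]) []]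
      simp [pvPlainStep, h]

-- the two word extractors agree
theorem pvExtract_eq (t : String) : GetTorrentParts t = pvSegments t := by
  unfold GetTorrentParts pvSegments
  rcases List.eq_nil_or_concat t.toList with hnil | ⟨ys, c, hc⟩
  · rw [hnil]; simp [PySem.List.enumerate]
  · rw [hc]
    have hlen : ((ys.concat c).length : Int) - 1 = (ys.length : Int) := by
      simp
    rw [hlen]
    rw [List.concat_eq_append, PySem.List.enumerate_append, List.foldl_append]
    rw [pvGtp_fold_eq_plain ys 0 (ys.length : Int) ([], []) (by omega)]
    have hseg := pvSeg_fold_rep ys [] []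
    simp only [List.nil_append] at hseg
    rw [List.foldl_append, hseg]
    set st := ys.foldl pvPlainStep ([], []) with hst
    have hlast : (ys ++ [c]).getLast? = some c := by simp
    rw [hlast]
    simp only [PySem.List.enumerate, List.foldl_cons, List.foldl_nil]
    by_cases h : pvAl c = true
    · rw [← pvAl_eq_isalnum, h, if_pos rfl]
      have hstep : pvGtpStep (ys.length : Int) st ((0 : Int) + ys.length, c)
          = (st.1 ++ [st.2 ++ [c]], st.2 ++ [c]) := by
        by_cases h1 : (('a' ≤ c && c ≤ 'z') || ('A' ≤ c && c ≤ 'Z')) = true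
        · simp [pvGtpStep, h1]
        · have h2 : (('0' ≤ c && c ≤ '9')) = true := by
            have := h; simp only [pvAl, h1, Bool.false_or] at this; exact this
          simp [pvGtpStep, h1, h2]
      rw [hstep]
      have hB : pvSegStep (st.1 ++ [st.2]) c = st.1 ++ [st.2 ++ [c]] := by
        simp [pvSegStep, ← pvAl_eq_isalnum, h]
      rw [hB]
    · have hf : pvAl c = false := Bool.eq_false_iff.mpr h
      rw [← pvAl_eq_isalnum, hf, if_neg (by simp)]
      rcases Bool.or_eq_false_iff.mp hf with ⟨h1, h2⟩
      have hstep : pvGtpStep (ys.length : Int) st ((0 : Int) + ys.length, c)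
          = (st.1 ++ [st.2], []) := by
        simp [pvGtpStep, h1, h2]
      rw [hstep]
      have hB : pvSegStep (st.1 ++ [st.2]) c = (st.1 ++ [st.2]) ++ [[]] := by
        simp [pvSegStep, ← pvAl_eq_isalnum, hf]
      rw [hB]
      simp

-- A's inner loop appends one 1 exactly when the lowered part occurs among the words
theorem pvMatchLoop_eq (pl : List Char) (acc : List Int) (ws : List (List Char)) :
    pvMatchLoop pl acc ws = if pl ∈ ws then acc ++ [(1 : Int)] else acc := by
  induction ws with
  | nil => simp [pvMatchLoop]
  | cons w ws ih =>
    by_cases h : w = pl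
    · simp [pvMatchLoop, h]
    · have hb : (w == pl) = false := by simpa using h
      have hne : ¬ pl = w := fun hEq => h hEq.symm
      simp [pvMatchLoop, hb, ih, List.mem_cons, hne]

-- length of A's accumulated parts_matched
theorem pvPM_len (tw : List (List Char)) (ps : List String) :
    ∀ acc : List Int,
    (ps.foldl (fun acc part => pvMatchLoop (PySem.Chars.lower part.toList) acc tw) acc).length
      = acc.length + ps.countP (fun p => decide (PySem.Chars.lower p.toList ∈ tw)) := by
  induction ps with
  | nil => intro acc; simp
  | cons p ps ih =>
    intro acc
    rw [List.foldl_cons, ih, pvMatchLoop_eq, List.countP_cons]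
    by_cases h : PySem.Chars.lower p.toList ∈ tw
    · simp [h]; omega
    · simp [h]

-- A's verdict: every part's lowering occurs among the torrent words
theorem pvA_char (t : String) (ps : List String) :
    CheckExactMatch t ps
      = decide (∀ p ∈ ps, PySem.Chars.lower p.toList ∈ GetTorrentParts t) := by
  show (if (ps.foldl (fun acc part =>
        pvMatchLoop (PySem.Chars.lower part.toList) acc (GetTorrentParts t)) []).length
          = ps.length then true else false) = _
  rw [pvPM_len]
  simp only [List.length_nil, Nat.zero_add]
  by_cases h : ps.countP (fun p => decide (PySem.Chars.lower p.toList ∈ GetTorrentParts t)) = ps.length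
  · have hall := List.countP_eq_length.mp h
    simp only [h, if_true]
    symm
    apply decide_eq_true
    intro p hp
    simpa using hall p hp
  · simp only [h, if_false]
    symm; simp only [decide_eq_false_iff_not]
    intro hall
    exact h (List.countP_eq_length.mpr (fun p hp => by simp [hall p hp]))

-- B's loop: the early return does not change the value; it computes 'no needed element survives all words'
theorem pvNeedLoop_eq (ws : List (List Char)) :
    ∀ (s : PySem.Set (List Char)),
    pvNeedLoop ws s = (s.filter (fun x => decide (x ∉ ws))).isEmpty := by
  induction ws with
  | nil => intro s; simp [pvNeedLoop]
  | cons w ws ih =>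
    intro s
    by_cases hs : s.isEmpty = true
    · have : s = [] := List.isEmpty_iff.mp hs
      subst this; simp [pvNeedLoop]
    · have hs' : s.isEmpty = false := Bool.eq_false_iff.mpr hs
      simp only [pvNeedLoop, hs', Bool.false_eq_true, if_false, ih (PySem.Set.discard s w)]
      congr 1
      show List.filter _ (List.filter _ s) = _
      rw [List.filter_filter]
      apply List.filter_congr
      intro x _
      by_cases hxw : x = w
      · simp [hxw]
      · simp [hxw, List.mem_cons]

theorem pvB_char (t : String) (ps : List String) :
    CheckExactMatch_alt t ps
      = decide (∀ p ∈ ps, PySem.Chars.lower p.toList ∈ pvSegments t) := by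
  show pvNeedLoop (pvSegments t)
      (PySem.Set.ofList (ps.map (fun p => (PySem.Str.lower p).toList))) = _
  rw [pvNeedLoop_eq]
  cases hd : decide (∀ p ∈ ps, PySem.Chars.lower p.toList ∈ pvSegments t)
  · simp only [decide_eq_false_iff_not] at hd
    push Not at hd
    obtain ⟨p, hp, hnc⟩ := hd
    simp only [List.isEmpty_eq_false_iff, ne_eq, List.filter_eq_nil_iff]
    push Not
    refine ⟨PySem.Chars.lower p.toList, ?_, by simp [hnc]⟩
    rw [PySem.Set.mem_ofList]
    exact List.mem_map.mpr ⟨p, hp, by simp⟩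
  · simp only [decide_eq_true_eq] at hd
    simp only [List.isEmpty_iff, List.filter_eq_nil_iff]
    intro x hx
    rw [PySem.Set.mem_ofList] at hx
    obtain ⟨p, hp, hpx⟩ := List.mem_map.mp hx
    have hxl : x = PySem.Chars.lower p.toList := by rw [← hpx]; simp
    simp [hxl, hd p hp]

-- ===== VERDICT (by name: the statement is the Claim_ definition above) =====
theorem CheckExactMatch_spec : Claim_equal_CheckExactMatch := by
  intro torrent name_parts _
  show CheckExactMatch torrent name_parts = CheckExactMatch_alt torrent name_parts
  rw [pvA_char, pvB_char, pvExtract_eq]
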